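-- pv_equiv track=rewrite | github.com/fuyaozhao1018/pattern | ttt/n9_exhaustive_battle.py | line_winner
-- ===== SOURCE A (Python) =====
-- from typing import Dict, List, Optional, Tuple
--
-- K = 4
--
-- def line_winner(seq: List[str]) -> Optional[str]:
--     """Check if any player has K consecutive in seq."""
--     for player in ('X', 'O'):
--         run = 0
--         for c in seq:
--             run = run + 1 if c == player else 0
--             if run >= K:
--                 return player
--     return None
-- ===== SOURCE B (Python) =====
-- K = 4
--
-- def line_winner(seq):
--     """Check if any player has K consecutive in seq (single pass, X has priority)."""
--     run_x = 0
--     run_o = 0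
--     found_o = False
--     for c in seq:
--         run_x = run_x + 1 if c == 'X' else 0
--         run_o = run_o + 1 if c == 'O' else 0
--         if run_x >= K:
--             return 'X'
--         if run_o >= K:
--             found_o = True
--     return 'O' if found_o else None
-- ===== Notes on version B (the rewrite author's own statement) =====
-- stated objective: alternative
-- what changed: Replaces A's two sequential per-player scans with a single pass maintaining both run counters, returning 'X' immediately and deferring 'O' to a flag checked after the loop.
import Mathlib
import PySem

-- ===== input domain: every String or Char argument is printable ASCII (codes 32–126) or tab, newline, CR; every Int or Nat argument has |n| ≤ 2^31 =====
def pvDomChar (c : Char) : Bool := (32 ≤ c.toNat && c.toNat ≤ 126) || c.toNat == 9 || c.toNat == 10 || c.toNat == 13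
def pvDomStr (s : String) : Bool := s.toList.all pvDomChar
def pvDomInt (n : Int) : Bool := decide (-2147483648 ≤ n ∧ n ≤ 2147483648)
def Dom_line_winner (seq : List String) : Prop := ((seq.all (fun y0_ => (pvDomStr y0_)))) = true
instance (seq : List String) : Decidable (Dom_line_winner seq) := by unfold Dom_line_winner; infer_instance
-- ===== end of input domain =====

-- B replaces A's two sequential per-player scans with a single pass keeping both run counters
-- (returning 'X' immediately, deferring 'O' to a flag): an alternative decomposition, same cost.


-- ===== PORT A =====
-- inner loop of A for one player: run counter, early return when run ≥ K (= 4)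
def pvPassA (player : String) : List String → Int → Bool
  | [], _ => false
  | c :: rest, run =>
      let run' : Int := if c == player then run + 1 else 0
      if run' ≥ 4 then true else pvPassA player rest run'

def line_winner (seq : List String) : Option String :=
  if pvPassA "X" seq 0 then some "X"
  else if pvPassA "O" seq 0 then some "O"
  else none

-- ===== PORT B =====
-- single pass: both run counters and the deferred-O flag
def pvLoopB : List String → Int → Int → Bool → Option String
  | [], _, _, foundO => if foundO then some "O" else none
  | c :: rest, runX, runO, foundO =>
      let runX' : Int := if c == "X" then runX + 1 else 0
      let runO' : Int := if c == "O" then runO + 1 else 0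
      if runX' ≥ 4 then some "X"
      else pvLoopB rest runX' runO' (foundO || decide (runO' ≥ 4))

def line_winner_alt (seq : List String) : Option String :=
  pvLoopB seq 0 0 false

-- ===== PRECONDITION & SPEC =====
def Spec_line_winner (seq : List String) (out : Option String) : Prop := out = line_winner_alt seq
instance (seq : List String) (out : Option String) : Decidable (Spec_line_winner seq out) := by unfold Spec_line_winner; infer_instance

-- ===== CLAIM (what is proved, stated in full; the proofs are below) =====
def Claim_equal_line_winner : Prop := ∀ (seq : List String), Dom_line_winner seq → Spec_line_winner seq (line_winner seq)

-- ===== LEMMAS AND PROOFS =====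
-- loop invariant: B's single-pass loop from an arbitrary state equals A's two-pass shape
theorem pvLoopB_eq (seq : List String) : ∀ (runX runO : Int) (foundO : Bool),
    pvLoopB seq runX runO foundO =
      (if pvPassA "X" seq runX then some "X"
       else if foundO || pvPassA "O" seq runO then some "O" else none) := by
  induction seq with
  | nil => intro runX runO foundO; simp [pvLoopB, pvPassA]
  | cons c rest ih =>
      intro runX runO foundO
      simp only [pvLoopB, pvPassA, ge_iff_le, beq_iff_eq]
      by_cases hx : (4:Int) ≤ (if c = "X" then runX + 1 else 0)
      · simp [hx]
      · simp only [hx, if_false]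
        rw [ih]
        simp [or_assoc]

-- ===== VERDICT (by name: the statement is the Claim_ definition above) =====
theorem line_winner_spec : Claim_equal_line_winner := by
  intro seq _
  unfold Spec_line_winner line_winner line_winner_alt
  rw [pvLoopB_eq]
  simp
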